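-- pv_equiv track=rewrite | github.com/miliar/Code_Jam_Webscraper | Solutions_python/Problem_55/447.py | solve
-- ===== SOURCE A (Python) =====
-- def solve(R, k, groups, case):
--     out = "Case #" + str(case+1) + ": "
--     profit = 0
--     car = []
--     while R > 0:
--         occupants = 0
--         while len(groups) > 0 and occupants+groups[0] <= k:
--             car.append(groups.pop(0))
--             occupants += car[-1]
--         profit += occupants
--         R -= 1
--         groups += car
--         car = []
--     out += str(profit)
--
--     return out
-- ===== SOURCE B (Python) =====
-- def solve(R, k, groups, case):
--     # Memoized per-start table: each start position's (ride profit, next start) is computed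
--     # at most once; rides are replayed by index over an immutable list.
--     n = len(groups)
--     memo = {}
--     rides = R if R > 0 else 0
--     profit = 0
--     start = 0
--     for _ in range(rides):
--         if n == 0:
--             break
--         if start not in memo:
--             occ = 0
--             cnt = 0
--             while cnt < n and occ + groups[(start + cnt) % n] <= k:
--                 occ += groups[(start + cnt) % n]
--                 cnt += 1
--             memo[start] = (occ, (start + cnt) % n)
--         occ, nxt = memo[start]
--         profit += occ
--         start = nxt
--     return "Case #" + str(case + 1) + ": " + str(profit)
-- ===== Notes on version B (the rewrite author's own statement) =====
-- stated objective: faster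
-- what changed: B memoizes, per start position, the ride's (profit, next start) the first time that start is seen and replays the R rides as lookups over an immutable list, instead of A's per-ride pop(0)/append rotation of the list; B also does not mutate the caller's groups list (A rotates it in place).
import Mathlib
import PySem

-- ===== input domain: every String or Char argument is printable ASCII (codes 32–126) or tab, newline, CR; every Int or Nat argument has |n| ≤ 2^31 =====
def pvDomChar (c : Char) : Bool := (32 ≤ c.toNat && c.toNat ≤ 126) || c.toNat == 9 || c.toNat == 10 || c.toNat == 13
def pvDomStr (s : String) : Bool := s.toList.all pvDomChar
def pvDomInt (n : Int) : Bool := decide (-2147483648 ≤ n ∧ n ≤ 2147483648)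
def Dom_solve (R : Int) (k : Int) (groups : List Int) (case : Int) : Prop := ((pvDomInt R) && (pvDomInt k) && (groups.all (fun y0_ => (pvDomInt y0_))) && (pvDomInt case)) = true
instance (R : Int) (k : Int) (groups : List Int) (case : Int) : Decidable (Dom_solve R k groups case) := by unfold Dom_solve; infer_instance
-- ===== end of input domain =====

-- B memoises a per-start (profit, next-start) table and replays rides by index instead of A's
-- pop(0)/append list rotation; return values proved equal (note: A also rotates the caller's
-- `groups` list in place, B does not — the claim is about the return value only).

-- ===== PORT A =====
-- inner `while len(groups) > 0 and occupants+groups[0] <= k` loop: state (groups, car, occupants)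
def innerA (k : Int) : List Int → List Int → Int → List Int × List Int × Int
  | g :: gs, car, occ =>
      if occ + g ≤ k then innerA k gs (car ++ [g]) (occ + g)
      else (g :: gs, car, occ)
  | [], car, occ => ([], car, occ)

-- outer `while R > 0` loop: runs R.toNat times, state (profit, groups)
def outerA (k : Int) : Nat → Int → List Int → Int
  | 0, profit, _ => profit
  | r + 1, profit, gs =>
      let t := innerA k gs [] 0
      outerA k r (profit + t.2.2) (t.1 ++ t.2.1)

def solve (R : Int) (k : Int) (groups : List Int) (case : Int) : String :=
  "Case #" ++ PySem.Int.toStr (case + 1) ++ ": " ++ PySem.Int.toStr (outerA k R.toNat 0 groups)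

-- ===== PORT B =====
-- Source B's inner while: greedy walk from start i, counting taken groups; groups[(i+cnt)%n] is
-- always in range when read (cnt < n forces n > 0, and (i+cnt)%n < n = length), so getD _ 0 is exact
def walkB (k : Int) (g : List Int) (n i cnt : Nat) (occ : Int) : Int × Nat :=
  if _h : cnt < n then
    if occ + g.getD ((i + cnt) % n) 0 ≤ k then
      walkB k g n i (cnt + 1) (occ + g.getD ((i + cnt) % n) 0)
    else (occ, (i + cnt) % n)
  else (occ, (i + cnt) % n)
termination_by n - cnt

-- Source B's `for _ in range(rides)` loop with the `if n == 0: break` guard and the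
-- `if start not in memo` memoisation; memo[start] is always present when read, so getD _ (0,0) is exact
def ridesB (k : Int) (g : List Int) (n : Nat) :
    Nat → Int → Nat → PySem.Dict Nat (Int × Nat) → Int
  | 0, profit, _, _ => profit
  | r + 1, profit, start, memo =>
      if n = 0 then profit
      else
        let memo' := if memo.contains start then memo
                     else memo.insert start (walkB k g n start 0 0)
        let p := memo'.getD start (0, 0)
        ridesB k g n r (profit + p.1) p.2 memo'

def solve_alt (R : Int) (k : Int) (groups : List Int) (case : Int) : String :=
  let n := groups.length
  let rides := if R > 0 then R.toNat else 0
  "Case #" ++ PySem.Int.toStr (case + 1) ++ ": " ++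
    PySem.Int.toStr (ridesB k groups n rides 0 0 PySem.Dict.empty)

-- ===== PRECONDITION & SPEC =====
def Spec_solve (R : Int) (k : Int) (groups : List Int) (case : Int) (out : String) : Prop := out = solve_alt R k groups case
instance (R : Int) (k : Int) (groups : List Int) (case : Int) (out : String) : Decidable (Spec_solve R k groups case out) := by unfold Spec_solve; infer_instance

-- ===== CLAIM (what is proved, stated in full; the proofs are below) =====
def Claim_equal_solve : Prop := ∀ (R : Int) (k : Int) (groups : List Int) (case : Int), Dom_solve R k groups case → Spec_solve R k groups case (solve R k groups case)

-- ===== LEMMAS AND PROOFS =====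

-- innerA only appends to car: factor the accumulator out
theorem innerA_car (k : Int) : ∀ (gs car : List Int) (occ : Int),
    innerA k gs car occ =
      ((innerA k gs [] occ).1, car ++ (innerA k gs [] occ).2.1, (innerA k gs [] occ).2.2) := by
  intro gs
  induction gs with
  | nil => intro car occ; simp [innerA]
  | cons g gs ih =>
    intro car occ
    by_cases h : occ + g ≤ k
    · simp only [innerA, if_pos h]
      rw [ih (car ++ [g]), ih ([] ++ [g])]
      simp
    · simp [innerA, if_neg h]

-- core correspondence: B's indexed walk from (s, cnt) computes the same profit as A's greedy pop
-- on the rotated list's suffix, and reports the rotation index A's next state corresponds to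
theorem walk_inner (k : Int) (g : List Int) (s : Nat) :
    ∀ (m cnt : Nat) (occ : Int), g.length - cnt = m → cnt ≤ g.length →
    ∃ cF, cnt ≤ cF ∧ cF ≤ g.length ∧
      walkB k g g.length s cnt occ =
        ((innerA k ((g.rotate s).drop cnt) [] occ).2.2, (s + cF) % g.length) ∧
      (innerA k ((g.rotate s).drop cnt) [] occ).1 = (g.rotate s).drop cF ∧
      (innerA k ((g.rotate s).drop cnt) [] occ).2.1 = ((g.rotate s).drop cnt).take (cF - cnt) := by
  intro m
  induction m with
  | zero =>
    intro cnt occ hm hle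
    have hcnt : cnt = g.length := by omega
    refine ⟨cnt, le_refl _, by omega, ?_⟩
    have hdrop : ((g.rotate s).drop cnt) = [] := by
      apply List.drop_eq_nil_of_le; simp [hcnt]
    rw [hdrop]
    rw [walkB]
    simp [innerA, hcnt]
  | succ m ih =>
    intro cnt occ hm hle
    have hcn : cnt < g.length := by omega
    have hn : 0 < g.length := by omega
    have hidx : (s + cnt) % g.length < g.length := Nat.mod_lt _ hn
    have hx : g.getD ((s + cnt) % g.length) 0 = g[(s + cnt) % g.length] :=
      List.getD_eq_getElem g 0 hidx
    have hcnt' : cnt < (g.rotate s).length := by simpa using hcn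
    have hget : (g.rotate s)[cnt] = g[(s + cnt) % g.length] := by
      rw [List.getElem_rotate]
      congr 1
      simp [Nat.add_comm]
    have hdrop : (g.rotate s).drop cnt = (g.rotate s)[cnt] :: (g.rotate s).drop (cnt + 1) :=
      List.drop_eq_getElem_cons hcnt'
    by_cases hcond : occ + g[(s + cnt) % g.length] ≤ k
    · -- take this group, continue
      obtain ⟨cF, h1, h2, h3, h4, h5⟩ :=
        ih (cnt + 1) (occ + g[(s + cnt) % g.length]) (by omega) (by omega)
      refine ⟨cF, by omega, h2, ?_⟩
      have hw : walkB k g g.length s cnt occ =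
          walkB k g g.length s (cnt + 1) (occ + g[(s + cnt) % g.length]) := by
        rw [walkB, dif_pos hcn, hx, if_pos hcond]
      have hiA : innerA k ((g.rotate s).drop cnt) [] occ =
          ((innerA k ((g.rotate s).drop (cnt+1)) [] (occ + g[(s + cnt) % g.length])).1,
           g[(s + cnt) % g.length] ::
             (innerA k ((g.rotate s).drop (cnt+1)) [] (occ + g[(s + cnt) % g.length])).2.1,
           (innerA k ((g.rotate s).drop (cnt+1)) [] (occ + g[(s + cnt) % g.length])).2.2) := by
        rw [hdrop, hget]
        simp only [innerA, if_pos hcond, List.nil_append]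
        rw [innerA_car k (List.drop (cnt + 1) (g.rotate s)) [g[(s + cnt) % g.length]]]
        simp
      refine ⟨?_, ?_, ?_⟩
      · rw [hw, hiA, h3]
      · rw [hiA]; exact h4
      · rw [hiA]
        simp only []
        rw [h5, hdrop]
        have : cF - cnt = (cF - (cnt + 1)) + 1 := by omega
        rw [this, List.take_succ_cons]
        rw [hget]
    · -- stop here
      refine ⟨cnt, le_refl _, by omega, ?_⟩
      have hw : walkB k g g.length s cnt occ = (occ, (s + cnt) % g.length) := by
        rw [walkB, dif_pos hcn, hx, if_neg hcond]
      have hiA : innerA k ((g.rotate s).drop cnt) [] occ =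
          ((g.rotate s).drop cnt, [], occ) := by
        rw [hdrop, hget]
        simp only [innerA, if_neg hcond]
      rw [hw, hiA]
      simp

-- one full ride from rotation index s: profit matches walkB, next list is the rotation walkB reports
theorem ride_step (k : Int) (g : List Int) (s : Nat) (hs : s < g.length) :
    (walkB k g g.length s 0 0).2 < g.length ∧
    (walkB k g g.length s 0 0).1 = (innerA k (g.rotate s) [] 0).2.2 ∧
    (innerA k (g.rotate s) [] 0).1 ++ (innerA k (g.rotate s) [] 0).2.1 =
      g.rotate (walkB k g g.length s 0 0).2 := by
  have hn : 0 < g.length := by omega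
  obtain ⟨cF, _, h2, h3, h4, h5⟩ := walk_inner k g s (g.length - 0) 0 0 rfl (by omega)
  simp only [List.drop_zero] at h3 h4 h5
  have hnx : (walkB k g g.length s 0 0).2 = (s + cF) % g.length := by rw [h3]
  refine ⟨by rw [hnx]; exact Nat.mod_lt _ hn, by rw [h3], ?_⟩
  rw [h4, h5, hnx]
  simp only [Nat.sub_zero]
  have htake : (g.rotate s).drop cF ++ (g.rotate s).take cF = (g.rotate s).rotate cF :=
    (List.rotate_eq_drop_append_take (show cF ≤ (g.rotate s).length by simpa using h2)).symm
  rw [htake, List.rotate_rotate]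
  rw [← List.rotate_mod g (s + cF)]

-- main loop correspondence, rides over a rotation of g, memo holding only correct walk results
theorem loop_eq (k : Int) (g : List Int) : ∀ (r : Nat) (profit : Int) (s : Nat)
    (memo : PySem.Dict Nat (Int × Nat)), s < g.length →
    (∀ s' v, memo.get? s' = some v → v = walkB k g g.length s' 0 0) →
    outerA k r profit (g.rotate s) = ridesB k g g.length r profit s memo := by
  intro r
  induction r with
  | zero => intro profit s memo hs _; simp [outerA, ridesB]
  | succ r ih =>
    intro profit s memo hs hmem
    have hn : g.length ≠ 0 := by omega
    obtain ⟨h1, h2, h3⟩ := ride_step k g s hs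
    rw [outerA, ridesB]
    rw [if_neg hn]
    set memo' := if memo.contains s then memo
                 else memo.insert s (walkB k g g.length s 0 0) with hmemo'
    have hmem' : ∀ s' v, memo'.get? s' = some v → v = walkB k g g.length s' 0 0 := by
      by_cases hc : memo.contains s = true
      · intro s' v hv; exact hmem s' v (by simpa [hmemo', hc] using hv)
      · intro s' v hv
        rw [hmemo'] at hv
        simp only [hc, Bool.false_eq_true, if_false] at hv
        rw [PySem.Dict.get?_insert] at hv
        by_cases hss : s' = s
        · simp only [hss, if_pos] at hv
          subst hss
          exact (Option.some_inj.mp hv).symm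
        · exact hmem s' v (by simpa [hss] using hv)
    have hgetD : memo'.getD s (0, 0) = walkB k g g.length s 0 0 := by
      by_cases hc : memo.contains s = true
      · have hsome : (memo.get? s).isSome := by
          rw [← PySem.Dict.contains_eq_isSome_get?]; exact hc
        obtain ⟨v, hv⟩ := Option.isSome_iff_exists.mp hsome
        have hveq := hmem s v hv
        rw [hmemo']
        simp only [hc, if_true]
        rw [PySem.Dict.getD_of_get?_eq_some memo (0, 0) hv, hveq]
      · rw [hmemo']
        simp only [hc, Bool.false_eq_true, if_false]
        rw [PySem.Dict.getD_insert_self]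
    show outerA k r (profit + (innerA k (g.rotate s) [] 0).2.2)
        ((innerA k (g.rotate s) [] 0).1 ++ (innerA k (g.rotate s) [] 0).2.1) =
      ridesB k g g.length r (profit + (memo'.getD s (0, 0)).1) (memo'.getD s (0, 0)).2 memo'
    rw [h3, hgetD, h2]
    exact ih _ _ memo' h1 hmem'

-- degenerate cases
theorem outerA_nil (k : Int) : ∀ (r : Nat) (profit : Int), outerA k r profit [] = profit := by
  intro r
  induction r with
  | zero => intro profit; simp [outerA]
  | succ r ih => intro profit; rw [outerA]; simp [innerA]; exact ih profit

theorem ridesB_zero (k : Int) (g : List Int) : ∀ (r : Nat) (profit : Int) (s : Nat)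
    (memo : PySem.Dict Nat (Int × Nat)), ridesB k g 0 r profit s memo = profit := by
  intro r; cases r <;> intro profit s memo <;> simp [ridesB]

theorem profits_eq (R k : Int) (groups : List Int) :
    outerA k R.toNat 0 groups =
      ridesB k groups groups.length (if R > 0 then R.toNat else 0) 0 0 PySem.Dict.empty := by
  have hr : (if R > 0 then R.toNat else 0) = R.toNat := by
    split <;> omega
  rw [hr]
  cases groups with
  | nil => rw [outerA_nil]; simp only [List.length_nil]; rw [ridesB_zero]
  | cons a l =>
    have := loop_eq k (a :: l) R.toNat 0 0 PySem.Dict.empty (by simp)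
      (by intro s' v hv; simp [PySem.Dict.get?_empty] at hv)
    simpa using this

-- ===== VERDICT (by name: the statement is the Claim_ definition above) =====
theorem solve_spec : Claim_equal_solve := by
  intro R k groups case _
  unfold Spec_solve solve solve_alt
  simp only []
  rw [profits_eq R k groups]
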